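-- pv_equiv track=rewrite | github.com/MeloYang05/CUHK-CSC1001-Assignment | Assignment 2/q3.py | sumofevendoublespace
-- ===== SOURCE A (Python) =====
-- def sumofevendoublespace(number):
--     step1_sum=0
--     number=str(number)
--     number_list1=list()
--     for i in range(len(number)-1,-1,-1):
--         if i%2==0:
--             number_list1.append(number[i])
--     for i in number_list1:
--         m=getdigit(int(i)*2)
--         step1_sum+=m
--     return step1_sum
--
-- def getdigit(number):
--     sum=0
--     for i in str(number):
--         sum+=int(i)
--     return sum
-- ===== SOURCE B (Python) =====
-- def sumofevendoublespace(number):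
--     total = 0
--     s = str(number)
--     while s:
--         v = int(s[0]) * 2
--         total += v if v < 10 else v - 9
--         s = s[2:]
--     return total
-- ===== Notes on version B (the rewrite author's own statement) =====
-- stated objective: simpler
-- what changed: Replaces the reversed index loop, intermediate list and the getdigit digit-sum helper with a single pairwise walk over the string (take the first char, skip one), adding the doubled digit's digit sum in closed form (the doubled digit itself, minus nine when it has two digits).
import Mathlib
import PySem

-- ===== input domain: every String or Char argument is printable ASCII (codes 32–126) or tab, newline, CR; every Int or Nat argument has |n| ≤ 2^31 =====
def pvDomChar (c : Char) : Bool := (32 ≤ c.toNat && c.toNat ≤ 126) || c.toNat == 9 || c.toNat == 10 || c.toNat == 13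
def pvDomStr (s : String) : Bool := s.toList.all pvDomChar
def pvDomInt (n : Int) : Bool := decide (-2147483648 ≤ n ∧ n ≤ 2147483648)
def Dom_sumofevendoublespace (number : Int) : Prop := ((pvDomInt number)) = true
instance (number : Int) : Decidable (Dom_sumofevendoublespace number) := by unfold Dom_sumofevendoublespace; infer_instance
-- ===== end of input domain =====

-- B replaces A's reversed index loop, intermediate list and getdigit helper by one pairwise
-- walk over the decimal string using a closed form for the doubled digit's digit sum; same cost, simpler.

-- ===== PORT A =====
-- getdigit: sum of the decimal digits of `number`.  int(i) on a single digit char is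
-- ported as its char code minus 48 (exact: A only calls getdigit on nonnegative ints,
-- whose str consists of digit chars).
def getdigit (number : Int) : Int :=
  (PySem.Int.toChars number).foldl (fun sum i => sum + ((i.toNat : Int) - 48)) 0

-- int(i)*2 on a digit char is ported as (code - 48) * 2; exact on Pre_ (0 ≤ number),
-- where str(number) consists of digit chars (Python raises ValueError on '-' otherwise).
def sumofevendoublespace (number : Int) : Int :=
  let s := PySem.Int.toChars number                       -- number = str(number)
  let number_list1 :=
    (PySem.List.pyRange ((s.length : Int) - 1) (-1) (-1)).foldl
      (fun acc i => if PySem.Int.mod i 2 == 0 then acc ++ [PySem.List.pyGetD s i ' '] else acc) []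
  number_list1.foldl (fun step1_sum i => step1_sum + getdigit (((i.toNat : Int) - 48) * 2)) 0

-- ===== PORT B =====
-- the while loop of Source B: consume s[0], continue with s[2:]; int(s[0]) ported as code - 48
-- (exact on Pre_, same remark as above).
def altLoop (total : Int) (s : List Char) : Int :=
  match s with
  | [] => total
  | c :: rest =>
      let v := ((c.toNat : Int) - 48) * 2
      altLoop (total + if v < 10 then v else v - 9) (List.drop 1 rest)   -- s = s[2:]
termination_by s.length
decreasing_by simp

def sumofevendoublespace_alt (number : Int) : Int :=
  altLoop 0 (PySem.Int.toChars number)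

-- ===== PRECONDITION & SPEC =====
-- Pre_ excludes negative numbers: there str(number) starts with '-' (an even index) and
-- both A and B raise ValueError on int('-').
def Pre_sumofevendoublespace (number : Int) : Prop := 0 ≤ number
instance (number : Int) : Decidable (Pre_sumofevendoublespace number) := by
  unfold Pre_sumofevendoublespace; infer_instance
def pvWitness_sumofevendoublespace : Int := 123

def Spec_sumofevendoublespace (number : Int) (out : Int) : Prop := out = sumofevendoublespace_alt number
instance (number : Int) (out : Int) : Decidable (Spec_sumofevendoublespace number out) := by unfold Spec_sumofevendoublespace; infer_instance

-- ===== CLAIM (what is proved, stated in full; the proofs are below) =====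
def Claim_equal_sumofevendoublespace : Prop := ∀ (number : Int), Dom_sumofevendoublespace number → Pre_sumofevendoublespace number → Spec_sumofevendoublespace number (sumofevendoublespace number)

-- ===== LEMMAS AND PROOFS =====

-- A's per-char summand, named for the proofs below
def fA (c : Char) : Int := getdigit (((c.toNat : Int) - 48) * 2)
-- B's per-char summand
def gB (c : Char) : Int :=
  let v := ((c.toNat : Int) - 48) * 2
  if v < 10 then v else v - 9

theorem altLoop_nil (t : Int) : altLoop t [] = t := by rw [altLoop]

theorem altLoop_cons (t : Int) (c : Char) (rest : List Char) :
    altLoop t (c :: rest) = altLoop (t + gB c) (List.drop 1 rest) := by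
  rw [altLoop]; rfl

-- on a digit char the digit sum of the doubled digit is the closed form
theorem fA_eq_gB (c : Char) (h1 : 48 ≤ c.toNat) (h2 : c.toNat ≤ 57) : fA c = gB c := by
  unfold fA gB
  generalize c.toNat = m at *
  interval_cases m <;> decide

-- str(n) of a nonnegative int consists of digit chars
theorem toChars_digits (n : Int) (hn : 0 ≤ n) :
    ∀ c ∈ PySem.Int.toChars n, 48 ≤ c.toNat ∧ c.toNat ≤ 57 := by
  intro c hc
  unfold PySem.Int.toChars at hc
  rw [if_neg (by omega)] at hc
  have := Nat.isDigit_of_mem_toDigits (b := 10) (n := n.toNat) (by norm_num) (le_refl _) hc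
  simp [Char.isDigit] at this
  exact ⟨this.1, this.2⟩

-- even indices of range (n+2) are 0 and the even indices of range n shifted by 2
theorem evens_range_succ_succ (n : Nat) :
    (List.range (n+2)).filter (fun k => k % 2 == 0)
      = 0 :: ((List.range n).filter (fun k => k % 2 == 0)).map (· + 2) := by
  rw [List.range_succ_eq_map, List.range_succ_eq_map]
  simp [List.filter_map, List.map_map]
  have hp : ((fun k : Nat => k % 2 == 0) ∘ Nat.succ ∘ Nat.succ) = (fun k : Nat => k % 2 == 0) := by
    funext k; show ((k + 2) % 2 == 0) = _; rw [Nat.add_mod_right]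
  have hm : (Nat.succ ∘ Nat.succ) = (fun k : Nat => k + 2) := by funext k; rfl
  rw [hp, hm]

-- the even-index fA-sum of a digit string equals B's pairwise loop
theorem evens_sum_eq_altLoop (n : Nat) : ∀ (s : List Char), s.length ≤ n →
    (∀ c ∈ s, 48 ≤ c.toNat ∧ c.toNat ≤ 57) → ∀ t : Int,
    altLoop t s = t + ((((List.range s.length).filter (fun k => k % 2 == 0)).map
      (fun k => fA (s.getD k ' '))).sum) := by
  induction n with
  | zero =>
      intro s hs _ t
      have : s = [] := List.eq_nil_of_length_eq_zero (by omega)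
      subst this; simp [altLoop_nil]
  | succ n ih =>
      intro s hs hd t
      match s with
      | [] => simp [altLoop_nil]
      | [c] =>
          have hc := hd c (by simp)
          rw [altLoop_cons, List.drop_nil, altLoop_nil]
          simp [List.range_succ, fA_eq_gB c hc.1 hc.2]
      | c :: b :: rest =>
          have hc := hd c (by simp)
          have hlen : (c :: b :: rest).length = rest.length + 2 := by simp
          rw [hlen, evens_range_succ_succ]
          rw [altLoop_cons, List.drop_succ_cons, List.drop_zero]
          rw [ih rest (by simp at hs ⊢; omega) (fun x hx => hd x (by simp [hx])) (t + gB c)]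
          rw [List.map_cons, List.map_map, List.sum_cons]
          have hsh : ((fun k => fA ((c :: b :: rest).getD k ' ')) ∘ (· + 2))
              = (fun k => fA (rest.getD k ' ')) := by funext k; rfl
          rw [hsh]
          have h0 : (c :: b :: rest).getD 0 ' ' = c := rfl
          rw [h0, fA_eq_gB c hc.1 hc.2]
          ring

-- predicate bridge: Python's i % 2 == 0 on a cast Nat index is Nat evenness
theorem mod_pred_natCast :
    (fun k : Nat => (PySem.Int.mod (k : Int) 2 == 0)) = (fun k : Nat => k % 2 == 0) := by
  funext k
  have h2 : PySem.Int.mod (k : Int) 2 = ((k % 2 : Nat) : Int) := by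
    exact_mod_cast PySem.Int.mod_natCast k 2
  rw [h2]
  rcases Nat.mod_two_eq_zero_or_one k with h | h <;> simp [h]

-- ===== VERDICT (by name: the statement is the Claim_ definition above) =====
theorem sumofevendoublespace_spec : Claim_equal_sumofevendoublespace := by
  intro number _ hpre
  unfold Spec_sumofevendoublespace sumofevendoublespace_alt
  have hA : sumofevendoublespace number =
      ((PySem.List.pyRange (((PySem.Int.toChars number).length : Int) - 1) (-1) (-1)).foldl
        (fun acc i => if PySem.Int.mod i 2 == 0 then
            acc ++ [PySem.List.pyGetD (PySem.Int.toChars number) i ' '] else acc) []).foldl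
        (fun step1_sum i => step1_sum + getdigit (((i.toNat : Int) - 48) * 2)) 0 := rfl
  rw [hA]
  have hdig : ∀ c ∈ PySem.Int.toChars number, 48 ≤ c.toNat ∧ c.toNat ≤ 57 :=
    toChars_digits number hpre
  generalize PySem.Int.toChars number = s at hdig ⊢
  -- the countdown range is the reverse of range(0, len(s))
  have hrange : PySem.List.pyRange ((s.length : Int) - 1) (-1) (-1)
      = (PySem.List.pyRange 0 (s.length : Int) 1).reverse := by
    rw [PySem.List.pyRange_neg_one_eq_reverse]
    norm_num
  rw [hrange, PySem.List.foldl_append_if, PySem.List.foldl_add, List.nil_append,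
      List.filter_reverse, List.map_reverse, List.map_reverse, List.sum_reverse]
  rw [PySem.List.pyRange_zero_nat, List.filter_map, List.map_map, List.map_map]
  have hcomp : ((fun i : Int => PySem.Int.mod i 2 == 0) ∘ (fun k : Nat => (k : Int)))
      = (fun k : Nat => k % 2 == 0) := by
    rw [← mod_pred_natCast]; rfl
  rw [hcomp]
  have hget : (((fun i => getdigit (((i.toNat : Int) - 48) * 2))
        ∘ (fun i : Int => PySem.List.pyGetD s i ' ')) ∘ (fun k : Nat => (k : Int)))
      = (fun k : Nat => fA (s.getD k ' ')) := by
    funext k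
    simp [Function.comp, PySem.List.pyGetD_natCast, fA]
  rw [hget, Int.zero_add]
  rw [evens_sum_eq_altLoop s.length s (le_refl _) hdig 0, Int.zero_add]
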